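-- pv_equiv track=rewrite | github.com/yssyss2323/Algorithm | 백준/Bronze/9455. 박스/박스.py | cal_col
-- ===== SOURCE A (Python) =====
-- def cal_col(arr, l):
--     sum = 0
--     cnt = 0
--     x = len(arr)
--     for i in range(x):
--         if arr[i] == 1:
--             cnt += 1
--             sum += l - 1 - i
--     return sum - (cnt - 1) * cnt // 2
-- ===== SOURCE B (Python) =====
-- def cal_col(arr, l):
--     # Count, for each box, the gaps (non-box cells) to its left: each box falls
--     # until it rests on the boxes below it, so its drop is (l - ones) minus the
--     # gaps before it... summed: ones*(l - ones) - total_gaps_passed.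
--     gaps = 0
--     shift = 0
--     ones = 0
--     for v in arr:
--         if v == 1:
--             ones += 1
--             shift += gaps
--         else:
--             gaps += 1
--     return ones * (l - ones) - shift
-- ===== Notes on version B (the rewrite author's own statement) =====
-- stated objective: alternative
-- what changed: B computes a different quantity: instead of summing per-box distances l-1-i and correcting with a triangular number, it counts the non-box cells (gaps) each box passes and returns ones*(l-ones) - shift, with no index variable and no triangular-number division.
import Mathlib
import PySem

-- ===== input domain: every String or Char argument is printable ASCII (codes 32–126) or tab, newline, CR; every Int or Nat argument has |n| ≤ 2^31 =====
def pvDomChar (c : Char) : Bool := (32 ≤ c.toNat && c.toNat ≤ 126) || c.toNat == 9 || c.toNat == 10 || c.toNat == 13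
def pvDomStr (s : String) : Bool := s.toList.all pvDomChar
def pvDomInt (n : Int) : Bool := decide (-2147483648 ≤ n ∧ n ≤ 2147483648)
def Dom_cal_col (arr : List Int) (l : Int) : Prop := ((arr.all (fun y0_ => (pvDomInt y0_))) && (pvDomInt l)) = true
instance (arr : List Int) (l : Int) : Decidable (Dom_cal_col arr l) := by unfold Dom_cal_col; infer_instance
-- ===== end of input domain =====

-- B counts gaps passed per box (ones*(l-ones) - shift) instead of A's per-index distances minus a triangular correction (alternative algorithm, same cost).


-- ===== PORT A =====
-- loop 'for i in range(x): if arr[i] == 1: cnt += 1; sum += l - 1 - i' as structural recursion over arr with index i, state (sum, cnt)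
def calColLoopA (l : Int) : List Int → Int → Int × Int → Int × Int
  | [], _, st => st
  | a :: rest, i, (s, c) =>
    if a == 1 then calColLoopA l rest (i + 1) (s + (l - 1 - i), c + 1)
    else calColLoopA l rest (i + 1) (s, c)

def cal_col (arr : List Int) (l : Int) : Int :=
  let sc := calColLoopA l arr 0 (0, 0)
  sc.1 - PySem.Int.floordiv ((sc.2 - 1) * sc.2) 2

-- ===== PORT B =====
-- loop 'for v in arr: if v == 1: ones += 1; shift += gaps else: gaps += 1', state (gaps, shift, ones)
def calColLoopB : List Int → Int → Int → Int → Int × Int × Int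
  | [], gaps, shift, ones => (gaps, shift, ones)
  | v :: rest, gaps, shift, ones =>
    if v == 1 then calColLoopB rest gaps (shift + gaps) (ones + 1)
    else calColLoopB rest (gaps + 1) shift ones

def cal_col_alt (arr : List Int) (l : Int) : Int :=
  let gso := calColLoopB arr 0 0 0
  gso.2.2 * (l - gso.2.2) - gso.2.1

-- ===== PRECONDITION & SPEC =====
def Spec_cal_col (arr : List Int) (l : Int) (out : Int) : Prop := out = cal_col_alt arr l
instance (arr : List Int) (l : Int) (out : Int) : Decidable (Spec_cal_col arr l out) := by unfold Spec_cal_col; infer_instance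

-- ===== CLAIM (what is proved, stated in full; the proofs are below) =====
def Claim_equal_cal_col : Prop := ∀ (arr : List Int) (l : Int), Dom_cal_col arr l → Spec_cal_col arr l (cal_col arr l)

-- ===== LEMMAS AND PROOFS =====
-- pvK = number of 1s; pvW l arr i = Σ over 1-positions of (l-1-index); pvT2 = Σ over 1s of 1s-after;
-- pvG = number of non-1s; pvSh arr z = Σ over 1s of (z + non-1s before it in arr)
def pvK : List Int → Int
  | [] => 0
  | a :: r => (if a == 1 then 1 else 0) + pvK r

def pvW (l : Int) : List Int → Int → Int
  | [], _ => 0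
  | a :: r, i => (if a == 1 then l - 1 - i else 0) + pvW l r (i + 1)

def pvT2 : List Int → Int
  | [] => 0
  | a :: r => (if a == 1 then pvK r + pvT2 r else pvT2 r)

def pvG : List Int → Int
  | [] => 0
  | a :: r => (if a == 1 then 0 else 1) + pvG r

def pvSh : List Int → Int → Int
  | [], _ => 0
  | a :: r, z => if a == 1 then z + pvSh r z else pvSh r (z + 1)

theorem loopA_eq (l : Int) : ∀ (arr : List Int) (i s c : Int),
    calColLoopA l arr i (s, c) = (s + pvW l arr i, c + pvK arr) := by
  intro arr
  induction arr with
  | nil => intro i s c; simp [calColLoopA, pvW, pvK]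
  | cons a r ih =>
    intro i s c
    by_cases h : a = 1 <;> simp [calColLoopA, pvW, pvK, h, ih] <;> constructor <;> ring

theorem loopB_eq : ∀ (arr : List Int) (g sh o : Int),
    calColLoopB arr g sh o = (g + pvG arr, sh + pvSh arr g, o + pvK arr) := by
  intro arr
  induction arr with
  | nil => intro g sh o; simp [calColLoopB, pvG, pvSh, pvK]
  | cons a r ih =>
    intro g sh o
    by_cases h : a = 1 <;> simp [calColLoopB, pvG, pvSh, pvK, h, ih, Prod.ext_iff] <;> omega

theorem two_T2 : ∀ (arr : List Int), 2 * pvT2 arr = (pvK arr - 1) * pvK arr := by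
  intro arr
  induction arr with
  | nil => simp [pvT2, pvK]
  | cons a r ih =>
    by_cases h : a = 1 <;> simp [pvT2, pvK, h] <;> linarith [ih, sq_nonneg (pvK r)]

theorem tri_floordiv (arr : List Int) :
    PySem.Int.floordiv ((pvK arr - 1) * pvK arr) 2 = pvT2 arr := by
  rw [← two_T2, mul_comm, PySem.Int.floordiv_eq_ediv_of_pos (by omega)]
  omega

-- algebraic bridge between the two loops' summaries
theorem bridge (l : Int) : ∀ (arr : List Int) (i z c : Int), i = z + c →
    pvW l arr i - pvT2 arr = pvK arr * (l - c - pvK arr) - pvSh arr z := by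
  intro arr
  induction arr with
  | nil => intro i z c _; simp [pvW, pvT2, pvK, pvSh]
  | cons a r ih =>
    intro i z c hz
    by_cases h : a = 1
    · have := ih (i + 1) z (c + 1) (by omega)
      simp [pvW, pvT2, pvK, pvSh, h]
      nlinarith [this]
    · have := ih (i + 1) (z + 1) c (by omega)
      simp [pvW, pvT2, pvK, pvSh, h]
      nlinarith [this]

-- ===== VERDICT (by name: the statement is the Claim_ definition above) =====
theorem cal_col_spec : Claim_equal_cal_col := by
  intro arr l _
  unfold Spec_cal_col cal_col cal_col_alt
  rw [loopA_eq, loopB_eq]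
  simp only [zero_add]
  rw [tri_floordiv]
  have := bridge l arr 0 0 0 (by ring)
  linarith [this]
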